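-- pv_equiv track=rewrite | github.com/davidmzeng/beat-the-landlord | beat_the_landlord.py | is_sequence_of_singles
-- ===== SOURCE A (Python) =====
-- RANK_ORDER = ("3", "4", "5", "6", "7", "8", "9", "10", "J", "Q", "K", "A", "2", "B", "R")
--
-- def sorted_cards(cards):
--     """
--     Takes cards as an argument and returns a new group of sorted cards
--     """
--     for card in cards: # check for invalid cards
--         if card not in RANK_ORDER:
--             raise ValueError("invalid card found")
--     sorted_result = []
--     for rank in RANK_ORDER: # iterate in sorted order
--         for card in cards:
--             if card == rank:
--                 sorted_result.append(card)
--     return sorted_result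
--
-- def get_rank(card):
--     """
--     Takes a card as an argument and returns a value representing its relative
--     rank compared with other cards
--     """
--     if card not in RANK_ORDER: # check that card isn't invalid
--         raise ValueError("invalid card")
--     return RANK_ORDER.index(card)
--
-- def is_sequence_of_singles(combo):
--     """
--     Takes a combo as an argument and returns True if it is a "sequence of singles" combo type,
--     returns False otherwise
--     """
--     for card in combo: # check for invalid cards
--         if card not in RANK_ORDER:
--             return False
--     if len(combo) < 5 or "2" in combo or "B" in combo or "R" in combo: # invalid combos
--         return False
--     sorted_combo = sorted_cards(combo)
--     for i in range(len(sorted_combo) - 1): # check if cards are consecutive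
--         if get_rank(sorted_combo[i]) != get_rank(sorted_combo[i + 1]) - 1:
--             return False
--     return True
-- ===== SOURCE B (Python) =====
-- RANK_ORDER = ("3", "4", "5", "6", "7", "8", "9", "10", "J", "Q", "K", "A", "2", "B", "R")
--
-- def is_sequence_of_singles(combo):
--     for card in combo:  # check for invalid cards
--         if card not in RANK_ORDER:
--             return False
--     if len(combo) < 5 or "2" in combo or "B" in combo or "R" in combo:  # invalid combos
--         return False
--     ranks = [RANK_ORDER.index(card) for card in combo]
--     return len(set(ranks)) == len(combo) and max(ranks) - min(ranks) == len(combo) - 1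
-- ===== Notes on version B (the rewrite author's own statement) =====
-- stated objective: simpler
-- what changed: Replaces the counting-sort over RANK_ORDER plus the adjacent-pair rank scan with a single rank pass that tests contiguity by distinctness (set size) and range span (max - min == len - 1).
import Mathlib
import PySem

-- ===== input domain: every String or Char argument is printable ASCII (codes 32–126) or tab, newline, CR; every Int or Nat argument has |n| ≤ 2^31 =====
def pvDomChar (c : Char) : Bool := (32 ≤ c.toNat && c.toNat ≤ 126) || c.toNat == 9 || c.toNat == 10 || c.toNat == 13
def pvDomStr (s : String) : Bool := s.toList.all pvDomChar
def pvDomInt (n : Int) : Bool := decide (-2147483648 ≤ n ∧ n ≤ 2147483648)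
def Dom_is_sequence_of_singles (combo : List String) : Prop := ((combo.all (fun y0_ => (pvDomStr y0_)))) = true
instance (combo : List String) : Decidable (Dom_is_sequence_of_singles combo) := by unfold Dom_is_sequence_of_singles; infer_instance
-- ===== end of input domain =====

-- B replaces A's counting-sort + adjacent-rank scan by a single rank pass with a
-- distinctness (set-size) and range-span (max - min = len - 1) test; same return value everywhere.

def pvRankOrder : List String :=
  ["3", "4", "5", "6", "7", "8", "9", "10", "J", "Q", "K", "A", "2", "B", "R"]

-- ===== PORT A =====
-- sorted_cards: the counting sort loops; its invalid-card guard (a raise) is unreachable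
-- from is_sequence_of_singles, which only calls it after checking every card is valid.
def pvSortedCards (cards : List String) : List String :=
  pvRankOrder.foldl (fun acc rank =>
    cards.foldl (fun acc2 card => if card == rank then acc2 ++ [card] else acc2) acc) []

-- get_rank: RANK_ORDER.index(card); only called on valid cards, where index? is some.
def pvGetRank (card : String) : Int :=
  (((PySem.List.index? pvRankOrder card).getD 0 : Nat) : Int)

def is_sequence_of_singles (combo : List String) : Bool :=
  if combo.any (fun card => !(pvRankOrder.contains card)) then false
  else if decide (combo.length < 5) || combo.contains "2" || combo.contains "B" || combo.contains "R" then false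
  else
    let sorted_combo := pvSortedCards combo
    -- for i in range(len(sorted_combo) - 1): indices are in range, so getD is exact
    if (List.range (sorted_combo.length - 1)).any (fun i =>
        pvGetRank (sorted_combo.getD i "") != pvGetRank (sorted_combo.getD (i + 1) "") - 1)
    then false
    else true

-- ===== PORT B =====
def is_sequence_of_singles_alt (combo : List String) : Bool :=
  if combo.any (fun card => !(pvRankOrder.contains card)) then false
  else if decide (combo.length < 5) || combo.contains "2" || combo.contains "B" || combo.contains "R" then false
  else
    -- ranks = [RANK_ORDER.index(card) for card in combo]; all cards valid here, index? is some
    let ranks : List Int := combo.map (fun card => (((PySem.List.index? pvRankOrder card).getD 0 : Nat) : Int))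
    (PySem.Set.ofList ranks).length == combo.length
      && ((PySem.List.max? ranks (fun x => x)).getD 0 - (PySem.List.min? ranks (fun x => x)).getD 0
            == (combo.length : Int) - 1)

-- ===== PRECONDITION & SPEC =====
def Spec_is_sequence_of_singles (combo : List String) (out : Bool) : Prop := out = is_sequence_of_singles_alt combo
instance (combo : List String) (out : Bool) : Decidable (Spec_is_sequence_of_singles combo out) := by unfold Spec_is_sequence_of_singles; infer_instance

-- ===== CLAIM (what is proved, stated in full; the proofs are below) =====
def Claim_equal_is_sequence_of_singles : Prop := ∀ (combo : List String), Dom_is_sequence_of_singles combo → Spec_is_sequence_of_singles combo (is_sequence_of_singles combo)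

-- ===== LEMMAS AND PROOFS =====

-- the natural-number rank of a card
def pvNr (card : String) : Nat := (PySem.List.index? pvRankOrder card).getD 0

-- "adjacent entries differ by one", the property A's index loop checks
def pvAdj : List Int → Prop
  | [] => True
  | [_] => True
  | a :: b :: t => a = b - 1 ∧ pvAdj (b :: t)

theorem pv_sorted_eq (combo : List String) :
    pvSortedCards combo
      = pvRankOrder.flatMap (fun rank => combo.filter (fun card => card == rank)) := by
  have h : ∀ (ks acc : List String),
      ks.foldl (fun acc rank =>
        combo.foldl (fun acc2 card => if card == rank then acc2 ++ [card] else acc2) acc) acc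
        = acc ++ ks.flatMap (fun rank => combo.filter (fun card => card == rank)) := by
    intro ks
    induction ks with
    | nil => simp
    | cons k ks ih =>
      intro acc
      rw [List.foldl_cons]
      have hin := PySem.List.foldl_append_if (fun card => card == k) id combo acc
      simp only [id, List.map_id] at hin
      rw [hin, ih, List.flatMap_cons, List.append_assoc]
  unfold pvSortedCards
  rw [h]
  simp

theorem pv_map_filter (l : List String) (k : String) (f : String → Nat) :
    (l.filter (fun c => c == k)).map f = List.replicate (l.count k) (f k) := by
  induction l with
  | nil => simp
  | cons c t ih =>
    by_cases hc : c = k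
    · subst hc
      simp [ih, List.replicate_succ]
    · simp [hc, ih, beq_iff_eq]

theorem pv_count_flatMap (ks l : List String) (hnd : ks.Nodup) (a : String) :
    (ks.flatMap (fun k => l.filter (fun c => c == k))).count a
      = if a ∈ ks then l.count a else 0 := by
  induction ks with
  | nil => simp
  | cons k ks ih =>
    rw [List.flatMap_cons, List.count_append, ih hnd.of_cons]
    by_cases hak : a = k
    · subst hak
      have h1 : (l.filter (fun c => c == a)).count a = l.count a :=
        List.count_filter (by simp)
      have h2 : a ∉ ks := (List.nodup_cons.mp hnd).1
      simp [h1, h2]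
    · have h1 : (l.filter (fun c => c == k)).count a = 0 := by
        rw [List.count_eq_zero]
        intro hmem
        exact hak (by simpa using (List.mem_filter.mp hmem).2)
      by_cases has : a ∈ ks <;> simp [h1, hak, has]

theorem pv_perm (l : List String) (h : ∀ c ∈ l, c ∈ pvRankOrder) :
    (pvRankOrder.flatMap (fun k => l.filter (fun c => c == k))).Perm l := by
  rw [List.perm_iff_count]
  intro a
  rw [pv_count_flatMap pvRankOrder l (by decide) a]
  by_cases ha : a ∈ pvRankOrder
  · simp [ha]
  · simp [ha, List.count_eq_zero.mpr (fun hc => ha (h a hc))]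

theorem pv_loop_false_iff (l : List Int) :
    (((List.range (l.length - 1)).any fun i => l.getD i 0 != l.getD (i + 1) 0 - 1) = false)
      ↔ pvAdj l := by
  induction l with
  | nil => simp [pvAdj]
  | cons x t ih =>
    cases t with
    | nil => simp [pvAdj]
    | cons y t2 =>
      have hlen : (x :: y :: t2 : List Int).length - 1 = t2.length + 1 := by simp
      rw [hlen, List.range_succ_eq_map]
      simp only [List.any_cons, List.any_map, Function.comp_def, Nat.succ_eq_add_one,
        Bool.or_eq_false_iff]
      have htail : ((List.range ((y :: t2 : List Int).length - 1)).any fun i =>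
          (y :: t2 : List Int).getD i 0 != (y :: t2 : List Int).getD (i + 1) 0 - 1)
          = ((List.range t2.length).any fun i =>
          (x :: y :: t2 : List Int).getD (i + 1) 0 != (x :: y :: t2 : List Int).getD (i + 1 + 1) 0 - 1) := by
        simp
      constructor
      · rintro ⟨h0, hrest⟩
        refine ⟨?_, ih.mp (by rw [htail]; exact hrest)⟩
        simpa using h0
      · rintro ⟨h0, hrest⟩
        refine ⟨by simpa using h0, ?_⟩
        rw [← htail]
        exact ih.mpr hrest

theorem pv_adj_iff_range' (S : List Nat) :
    pvAdj (S.map (fun u : Nat => (u : Int))) ↔ S = List.range' (S.headD 0) S.length := by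
  induction S with
  | nil => simp [pvAdj]
  | cons x t ih =>
    cases t with
    | nil => simp [pvAdj]
    | cons y t2 =>
      simp only [List.headD_cons, List.length_cons] at ih ⊢
      show ((x : Int) = (y : Int) - 1 ∧ pvAdj ((y : Int) :: t2.map (fun u : Nat => (u : Int)))) ↔ _
      rw [List.range'_succ]
      constructor
      · rintro ⟨h0, hrest⟩
        have hy : y = x + 1 := by omega
        have ht := ih.mp (by simpa using hrest)
        rw [← hy, ← ht]
      · intro hEq
        rw [List.cons_eq_cons] at hEq
        have ht2 := hEq.2
        have hy : y = x + 1 := by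
          rw [List.range'_succ, List.cons_eq_cons] at ht2
          exact ht2.1
        refine ⟨by omega, ?_⟩
        have := ih.mpr (by rw [← hy] at ht2; exact ht2)
        simpa using this

theorem pv_pairwise_le (ks : List String) (c : String → Nat) (g : String → Nat)
    (h : ks.Pairwise (fun a b => g a ≤ g b)) :
    (ks.flatMap (fun k => List.replicate (c k) (g k))).Pairwise (· ≤ ·) := by
  induction ks with
  | nil => simp
  | cons k ks ih =>
    rw [List.flatMap_cons, List.pairwise_append]
    obtain ⟨h1, h2⟩ := List.pairwise_cons.mp h
    refine ⟨List.pairwise_replicate.mpr (Or.inr le_rfl), ih h2, ?_⟩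
    intro a ha b hb
    obtain ⟨k', hk', hb'⟩ := List.mem_flatMap.mp hb
    rw [List.eq_of_mem_replicate ha, List.eq_of_mem_replicate hb']
    exact h1 k' hk'

theorem pv_span (l : List Nat) (hp : l.Pairwise (· < ·)) :
    ∀ b, (∀ y ∈ l, y ≤ b) → l ≠ [] → l.headD 0 + l.length ≤ b + 1 := by
  induction l with
  | nil => intro _ _ h; exact absurd rfl h
  | cons x t ih =>
    intro b hb _
    obtain ⟨h1, h2⟩ := List.pairwise_cons.mp hp
    cases t with
    | nil => simpa using hb x (by simp)
    | cons y t2 =>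
      have := ih h2 b (fun z hz => hb z (List.mem_cons_of_mem x hz)) (by simp)
      have hxy : x < y := h1 y (by simp)
      simp only [List.headD_cons, List.length_cons] at this ⊢
      omega

theorem pv_strict_range' (l : List Nat) :
    ∀ lo, l.Pairwise (· < ·) →
    (∀ y ∈ l, lo ≤ y ∧ y + 1 ≤ lo + l.length) → l = List.range' lo l.length := by
  induction l with
  | nil => intro lo _ _; rfl
  | cons x t ih =>
    intro lo hp hbound
    obtain ⟨h1, h2⟩ := List.pairwise_cons.mp hp
    have hxlo : x = lo := by
      have hs := pv_span (x :: t) hp (lo + t.length)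
        (fun y hy => by have := (hbound y hy).2; simp only [List.length_cons] at this; omega)
        (by simp)
      have := (hbound x (by simp)).1
      simp only [List.headD_cons, List.length_cons] at hs
      omega
    subst hxlo
    have ht : t = List.range' (x + 1) t.length := by
      apply ih (x + 1) h2
      intro y hy
      have hb := hbound y (List.mem_cons_of_mem x hy)
      have := h1 y hy
      simp only [List.length_cons] at hb
      omega
    rw [List.length_cons, List.range'_succ, ← ht]

theorem pv_ofList_len (l : List Int) :
    (PySem.Set.ofList l).length = l.length ↔ l.Nodup := by
  constructor
  · intro h
    have hperm : (PySem.Set.ofList l).Perm l.dedup :=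
      (List.perm_ext_iff_of_nodup (PySem.Set.nodup_ofList l) l.nodup_dedup).mpr
        (by intro a; simp [PySem.Set.mem_ofList, List.mem_dedup])
    have hlen := hperm.length_eq
    rw [← List.dedup_eq_self]
    exact (List.dedup_sublist l).eq_of_length (by omega)
  · intro h
    rw [PySem.Set.ofList_eq_self_of_nodup l h]

theorem pv_core (combo : List String)
    (hvalid : ∀ c ∈ combo, c ∈ pvRankOrder) (hne : combo ≠ []) :
    (if (List.range ((pvSortedCards combo).length - 1)).any (fun i =>
        pvGetRank ((pvSortedCards combo).getD i "") != pvGetRank ((pvSortedCards combo).getD (i + 1) "") - 1)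
     then false else true)
    = ((PySem.Set.ofList (combo.map (fun card => (((PySem.List.index? pvRankOrder card).getD 0 : Nat) : Int)))).length == combo.length
        && ((PySem.List.max? (combo.map (fun card => (((PySem.List.index? pvRankOrder card).getD 0 : Nat) : Int))) (fun x => x)).getD 0
              - (PySem.List.min? (combo.map (fun card => (((PySem.List.index? pvRankOrder card).getD 0 : Nat) : Int))) (fun x => x)).getD 0
              == (combo.length : Int) - 1)) := by
  have hcastinj : Function.Injective (fun u : Nat => (u : Int)) := fun a b h => by simpa using h
  have hranks : combo.map (fun card => (((PySem.List.index? pvRankOrder card).getD 0 : Nat) : Int))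
      = (combo.map pvNr).map (fun u : Nat => (u : Int)) := by
    rw [List.map_map]; rfl
  rw [hranks]
  set S : List Nat := (pvSortedCards combo).map pvNr with hSdef
  set R : List Int := (combo.map pvNr).map (fun u : Nat => (u : Int)) with hRdef
  -- A's loop list is S.map cast
  have hmapmap : (pvSortedCards combo).map pvGetRank = S.map (fun u : Nat => (u : Int)) := by
    rw [hSdef, List.map_map]; rfl
  have hgd : ∀ i : Nat, pvGetRank ((pvSortedCards combo).getD i "")
      = ((pvSortedCards combo).map pvGetRank).getD i 0 := by
    intro i
    rw [List.getD_eq_getElem?_getD, List.getD_eq_getElem?_getD, List.getElem?_map]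
    cases (pvSortedCards combo)[i]? with
    | none => decide
    | some a => rfl
  have hloop : ((List.range ((pvSortedCards combo).length - 1)).any (fun i =>
        pvGetRank ((pvSortedCards combo).getD i "") != pvGetRank ((pvSortedCards combo).getD (i + 1) "") - 1))
      = ((List.range ((S.map (fun u : Nat => (u : Int))).length - 1)).any (fun i =>
        (S.map (fun u : Nat => (u : Int))).getD i 0 != (S.map (fun u : Nat => (u : Int))).getD (i + 1) 0 - 1)) := by
    simp only [hgd, hmapmap, List.length_map, hSdef]
  rw [hloop]
  have hite : ∀ b : Bool, (if b then false else true) = !b := by decide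
  rw [hite]
  -- shared facts
  have hsorted_perm : (pvSortedCards combo).Perm combo := by
    rw [pv_sorted_eq]; exact pv_perm combo hvalid
  have hSperm : S.Perm (combo.map pvNr) := hsorted_perm.map pvNr
  have hSlen : S.length = combo.length := by
    rw [hSdef, List.length_map]; exact hsorted_perm.length_eq
  have hn1 : 1 ≤ combo.length := List.length_pos_of_ne_nil hne
  have hRlen : R.length = combo.length := by rw [hRdef]; simp
  have hpairS : S.Pairwise (· ≤ ·) := by
    rw [hSdef, pv_sorted_eq, List.map_flatMap]
    have hmf : (fun k => (combo.filter (fun c => c == k)).map pvNr)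
        = (fun k => List.replicate (combo.count k) (pvNr k)) := by
      funext k; exact pv_map_filter combo k pvNr
    rw [hmf]
    exact pv_pairwise_le pvRankOrder (fun k => combo.count k) pvNr (by decide)
  -- max and min of R
  have hRne : R ≠ [] := by
    intro h; rw [← List.length_eq_zero_iff] at h; omega
  obtain ⟨M, hM⟩ : ∃ M, PySem.List.max? R (fun x => x) = some M := by
    cases h : PySem.List.max? R (fun x => x) with
    | none => exact absurd ((PySem.List.max?_eq_none_iff R _).mp h) hRne
    | some M => exact ⟨M, rfl⟩
  obtain ⟨m, hm⟩ : ∃ m, PySem.List.min? R (fun x => x) = some m := by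
    cases h : PySem.List.min? R (fun x => x) with
    | none => exact absurd ((PySem.List.min?_eq_none_iff R _).mp h) hRne
    | some m => exact ⟨m, rfl⟩
  obtain ⟨uM, huMmem, huMeq⟩ := List.mem_map.mp (PySem.List.max?_mem hM)
  obtain ⟨um, hummem, humeq⟩ := List.mem_map.mp (PySem.List.min?_mem hm)
  have huMS : uM ∈ S := hSperm.mem_iff.mpr huMmem
  have humS : um ∈ S := hSperm.mem_iff.mpr hummem
  have hmemSR : ∀ y ∈ S, ((y : Nat) : Int) ∈ R := by
    intro y hy
    exact List.mem_map_of_mem (hSperm.mem_iff.mp hy)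
  have hMmax : ∀ y ∈ R, y ≤ M := fun y hy => PySem.List.max?_isMax hM y hy
  have hmmin : ∀ y ∈ R, m ≤ y := fun y hy => PySem.List.min?_isMin hm y hy
  rw [hM, hm]
  simp only [Option.getD_some]
  rw [Bool.eq_iff_iff, Bool.not_eq_true', pv_loop_false_iff, pv_adj_iff_range']
  simp only [Bool.and_eq_true, beq_iff_eq]
  constructor
  · -- A's adjacency holds: S is a contiguous range
    intro hSr
    have hnodupS : S.Nodup := by rw [hSr]; exact List.nodup_range' 1
    have hnodupNat : (combo.map pvNr).Nodup := hSperm.nodup_iff.mp hnodupS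
    have hnodupR : R.Nodup := hnodupNat.map hcastinj
    refine ⟨by rw [PySem.Set.ofList_eq_self_of_nodup R hnodupR, hRlen], ?_⟩
    set lo := S.headD 0
    have hSlen1 : 1 ≤ S.length := by omega
    have huMr := List.mem_range'_1.mp (hSr ▸ huMS)
    have humr := List.mem_range'_1.mp (hSr ▸ humS)
    have htopS : lo + S.length - 1 ∈ S := by
      have hmem : lo + S.length - 1 ∈ List.range' lo S.length :=
        List.mem_range'_1.mpr ⟨by omega, by omega⟩
      rwa [← hSr] at hmem
    have hbotS : lo ∈ S := by
      have hmem : lo ∈ List.range' lo S.length :=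
        List.mem_range'_1.mpr ⟨by omega, by omega⟩
      rwa [← hSr] at hmem
    have htop := hMmax _ (hmemSR _ htopS)
    have hbot := hmmin _ (hmemSR _ hbotS)
    rw [← huMeq, ← humeq] at *
    have h1 : uM = lo + S.length - 1 := by
      have : lo + S.length - 1 ≤ uM := by exact_mod_cast htop
      omega
    have h2 : um = lo := by
      have : um ≤ lo := by exact_mod_cast hbot
      omega
    subst h1 h2
    rw [hSlen] at *
    omega
  · -- B's distinctness + span hold: reconstruct the range
    rintro ⟨hlenEq, hspan⟩
    have hnodupR : R.Nodup := (pv_ofList_len R).mp (by rw [hlenEq, hRlen])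
    have hnodupNat : (combo.map pvNr).Nodup := List.Nodup.of_map _ hnodupR
    have hnodupS : S.Nodup := hSperm.nodup_iff.mpr hnodupNat
    have hlt : S.Pairwise (· < ·) :=
      (hpairS.and hnodupS).imp (fun h => lt_of_le_of_ne h.1 h.2)
    have hbounds : ∀ y ∈ S, um ≤ y ∧ y ≤ uM := by
      intro y hy
      have h1 := hmmin _ (hmemSR _ hy)
      have h2 := hMmax _ (hmemSR _ hy)
      rw [← humeq] at h1
      rw [← huMeq] at h2
      exact ⟨by exact_mod_cast h1, by exact_mod_cast h2⟩
    have humle : um ≤ uM := (hbounds uM huMS).1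
    have huMval : uM = um + (combo.length - 1) := by
      rw [← huMeq, ← humeq] at hspan
      have := (hbounds uM huMS).1
      have h1 : (uM : Int) - um = (combo.length : Int) - 1 := hspan
      omega
    have hSr : S = List.range' um S.length := by
      apply pv_strict_range' S um hlt
      intro y hy
      have := hbounds y hy
      rw [hSlen]
      omega
    have hhead : S.headD 0 = um := by
      obtain ⟨k, hk⟩ : ∃ k, S.length = k + 1 := ⟨S.length - 1, by omega⟩
      rw [hSr, hk, List.range'_succ]
      rfl
    rw [hhead]
    exact hSr

-- ===== VERDICT (by name: the statement is the Claim_ definition above) =====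
theorem is_sequence_of_singles_spec : Claim_equal_is_sequence_of_singles := by
  intro combo _
  unfold Spec_is_sequence_of_singles is_sequence_of_singles is_sequence_of_singles_alt
  by_cases h1 : (combo.any (fun card => !(pvRankOrder.contains card))) = true
  · rw [if_pos h1, if_pos h1]
  · rw [if_neg h1, if_neg h1]
    by_cases h2 : (decide (combo.length < 5) || combo.contains "2" || combo.contains "B" || combo.contains "R") = true
    · rw [if_pos h2, if_pos h2]
    · rw [if_neg h2, if_neg h2]
      have h1' := eq_false_of_ne_true h1
      simp only [List.any_eq_false, Bool.not_eq_eq_eq_not, Bool.not_true, List.contains_eq_mem,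
        decide_eq_false_iff_not] at h1'
      have h2' := eq_false_of_ne_true h2
      simp only [Bool.or_eq_false_iff, decide_eq_false_iff_not] at h2'
      have hne : combo ≠ [] := by
        intro h; subst h; exact h2'.1.1.1 (by simp)
      exact pv_core combo (fun c hc => not_not.mp (h1' c hc)) hne
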